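-- pv_equiv track=rewrite | github.com/begumsozer/python-exercises | exercise-edabit-61.py | mystery_func
-- ===== SOURCE A (Python) =====
-- def mystery_func(n):
--   str_n=str(n)
--   len_str_n=len(str_n)
--   output=1
--   if len_str_n == 0:
--     return ""
--   x=1
--   while x < len_str_n:
--     if str_n[x] == str_n[0]:
--       output+=1
--     else:
--       break
--     x+=1
--   return str(output)+str_n[0]+mystery_func(str_n[x:])
-- ===== SOURCE B (Python) =====
-- def mystery_func(n):
--   s = str(n)
--   if not s:
--     return ""
--   parts = []
--   prev = s[0]
--   cnt = 1
--   for c in s[1:]: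
--     if c == prev:
--       cnt += 1
--     else:
--       parts.append(str(cnt) + prev)
--       prev = c
--       cnt = 1
--   parts.append(str(cnt) + prev)
--   return "".join(parts)
-- ===== Notes on version B (the rewrite author's own statement) =====
-- stated objective: faster
-- what changed: replaced the recursive count-then-slice-and-recurse scheme (which copies the remaining string at every run and concatenates recursively) with a single iterative forward pass keeping (prev,count) and appending run codes to a list joined once
import Mathlib
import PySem

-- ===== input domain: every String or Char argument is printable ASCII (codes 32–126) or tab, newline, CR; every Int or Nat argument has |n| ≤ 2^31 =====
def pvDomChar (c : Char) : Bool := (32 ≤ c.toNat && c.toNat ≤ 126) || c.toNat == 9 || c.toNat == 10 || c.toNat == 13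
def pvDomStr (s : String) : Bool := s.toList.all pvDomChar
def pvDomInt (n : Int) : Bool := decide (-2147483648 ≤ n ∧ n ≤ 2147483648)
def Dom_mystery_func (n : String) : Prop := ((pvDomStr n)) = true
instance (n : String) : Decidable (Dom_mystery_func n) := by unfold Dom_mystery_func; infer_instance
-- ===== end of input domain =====

-- B replaces A's count-run/slice/recurse scheme by one iterative forward pass with a
-- (prev, count) accumulator, joined once at the end; objective: faster (no repeated slicing).

-- ===== PORT A =====
-- the while loop: number of further chars equal to the first char before the break
def mfA_run (c0 : Char) : List Char → Nat
  | [] => 0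
  | c :: t => if c = c0 then 1 + mfA_run c0 t else 0

def mfA_go : List Char → List Char
  | [] => []
  | c :: t =>
    (PySem.Int.toStr (1 + (mfA_run c t : Int))).toList ++ [c] ++ mfA_go (t.drop (mfA_run c t))
termination_by l => l.length
decreasing_by
  have hlen := List.length_drop (l := t) (i := mfA_run c t)
  simp_all

def mystery_func (n : String) : String := String.mk (mfA_go n.toList)

-- ===== PORT B =====
def mfB_go (prev : Char) (cnt : Int) (acc : List Char) : List Char → List Char
  | [] => acc ++ (PySem.Int.toStr cnt).toList ++ [prev]
  | c :: t =>
    if c = prev then mfB_go prev (cnt + 1) acc t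
    else mfB_go c 1 (acc ++ (PySem.Int.toStr cnt).toList ++ [prev]) t

def mystery_func_alt (n : String) : String :=
  match n.toList with
  | [] => ""
  | c :: t => String.mk (mfB_go c 1 [] t)

-- ===== PRECONDITION & SPEC =====
def Spec_mystery_func (n : String) (out : String) : Prop := out = mystery_func_alt n
instance (n : String) (out : String) : Decidable (Spec_mystery_func n out) := by unfold Spec_mystery_func; infer_instance

-- ===== CLAIM (what is proved, stated in full; the proofs are below) =====
def Claim_equal_mystery_func : Prop := ∀ (n : String), Dom_mystery_func n → Spec_mystery_func n (mystery_func n)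

-- ===== LEMMAS AND PROOFS =====
theorem mfA_go_nil : mfA_go [] = [] := by rw [mfA_go]

theorem mfA_go_cons (c : Char) (t : List Char) :
    mfA_go (c :: t) =
      (PySem.Int.toStr (1 + (mfA_run c t : Int))).toList ++ [c] ++ mfA_go (t.drop (mfA_run c t)) := by
  rw [mfA_go]
theorem mfB_go_eq (t : List Char) : ∀ (prev : Char) (cnt : Int) (acc : List Char),
    mfB_go prev cnt acc t =
      acc ++ (PySem.Int.toStr (cnt + (mfA_run prev t : Int))).toList ++ [prev]
        ++ mfA_go (t.drop (mfA_run prev t)) := by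
  induction t with
  | nil => intro prev cnt acc; simp [mfB_go, mfA_run, mfA_go_nil]
  | cons c t ih =>
    intro prev cnt acc
    by_cases h : c = prev
    · subst h
      have harith : cnt + 1 + (mfA_run c t : Int) = cnt + ((1 + mfA_run c t : Nat) : Int) := by
        push_cast; ring
      simp only [mfB_go, mfA_run, ih, harith]
      have hd : 1 + mfA_run c t = mfA_run c t + 1 := Nat.add_comm _ _
      simp [hd, List.drop_succ_cons]
    · simp only [mfB_go, mfA_run, if_neg h, ih, List.drop_zero]
      rw [mfA_go_cons]
      simp

theorem mystery_func_spec : Claim_equal_mystery_func := by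
  intro n _
  unfold Spec_mystery_func mystery_func mystery_func_alt
  cases h : n.toList with
  | nil => rw [mfA_go_nil]; rfl
  | cons c t =>
    show String.mk (mfA_go (c :: t)) = String.mk (mfB_go c 1 [] t)
    rw [mfB_go_eq, mfA_go_cons]
    simp
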